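-- pv_equiv track=rewrite | github.com/MrBrantCode/unitest_baseline | mut_generate/mist_train_cf/cf_53332/solution.py | findSecondThirdMin
-- ===== SOURCE A (Python) =====
-- def findSecondThirdMin(arr):
--     unique_nums = list(set(arr)) # Removing duplicate values
--     first_min, second_min, third_min = float('inf'), float('inf'), float('inf')
--
--     for num in unique_nums:
--         if num <= first_min:
--             third_min = second_min
--             second_min = first_min
--             first_min = num
--         elif num <= second_min:
--             third_min = second_min
--             second_min = num
--         elif num <= third_min:
--             third_min = num
--
--     if second_min == float('inf') or third_min == float('inf'):
--         return None
--
--     return [second_min, third_min]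
-- ===== SOURCE B (Python) =====
-- def findSecondThirdMin(arr):
--     s = sorted(set(arr))
--     if len(s) < 3:
--         return None
--     return [s[1], s[2]]
-- ===== Notes on version B (the rewrite author's own statement) =====
-- stated objective: simpler
-- what changed: Replaces A's single-pass three-way minimum tracking with inf sentinels by sorting the distinct values and indexing the second and third elements.
import Mathlib
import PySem

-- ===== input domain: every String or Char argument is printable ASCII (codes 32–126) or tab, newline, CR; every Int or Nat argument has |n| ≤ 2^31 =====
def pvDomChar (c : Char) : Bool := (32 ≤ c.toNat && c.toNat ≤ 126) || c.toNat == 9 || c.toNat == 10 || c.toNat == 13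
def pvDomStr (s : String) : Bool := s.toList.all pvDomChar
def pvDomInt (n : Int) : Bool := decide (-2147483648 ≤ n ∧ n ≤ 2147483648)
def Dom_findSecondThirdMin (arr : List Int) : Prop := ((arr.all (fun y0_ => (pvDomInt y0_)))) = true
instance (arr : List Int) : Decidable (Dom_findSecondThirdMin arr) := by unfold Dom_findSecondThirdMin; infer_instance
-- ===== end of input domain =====

-- B replaces A's single-pass three-minimum tracking (with inf sentinels) by sorting the
-- distinct values and indexing the second and third elements; objective: simpler.


-- ===== PORT A =====
-- float('inf') sentinel ported as `none` (Option Int); `num <= m` with m possibly inf: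
def pvLeInf (num : Int) (m : Option Int) : Bool :=
  match m with
  | none => true          -- num <= inf is always true
  | some v => num ≤ v

-- one iteration of A's for-loop over (first_min, second_min, third_min)
def pvStep (st : Option Int × Option Int × Option Int) (num : Int) :
    Option Int × Option Int × Option Int :=
  let (f, s, t) := st
  if pvLeInf num f then (some num, f, s)
  else if pvLeInf num s then (f, some num, s)
  else if pvLeInf num t then (f, s, some num)
  else (f, s, t)

def findSecondThirdMin (arr : List Int) : Option (List Int) :=
  let uniqueNums := PySem.Set.ofList arr      -- list(set(arr))
  let st := uniqueNums.foldl pvStep (none, none, none)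
  match st with
  | (_, some s, some t) => some [s, t]
  | _ => none                                  -- second_min or third_min still inf

-- ===== PORT B =====
def findSecondThirdMin_alt (arr : List Int) : Option (List Int) :=
  let s := PySem.List.sorted (PySem.Set.ofList arr) (fun x => x) false   -- sorted(set(arr))
  match s with
  | _ :: b :: c :: _ => some [b, c]            -- len(s) >= 3: [s[1], s[2]]
  | _ => none                                  -- len(s) < 3

-- ===== PRECONDITION & SPEC =====
def Spec_findSecondThirdMin (arr : List Int) (out : Option (List Int)) : Prop := out = findSecondThirdMin_alt arr
instance (arr : List Int) (out : Option (List Int)) : Decidable (Spec_findSecondThirdMin arr out) := by unfold Spec_findSecondThirdMin; infer_instance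

-- ===== CLAIM (what is proved, stated in full; the proofs are below) =====
def Claim_equal_findSecondThirdMin : Prop := ∀ (arr : List Int), Dom_findSecondThirdMin arr → Spec_findSecondThirdMin arr (findSecondThirdMin arr)

-- ===== LEMMAS AND PROOFS =====

-- first three elements (as options) of a list
def pvTop3 (l : List Int) : Option Int × Option Int × Option Int := (l[0]?, l[1]?, l[2]?)

-- ordered insertion into a sorted list
def pvIns (x : Int) (l : List Int) : List Int :=
  match l with
  | [] => [x]
  | a :: t => if x ≤ a then x :: a :: t else a :: pvIns x t

lemma pvIns_perm (x : Int) (l : List Int) : (pvIns x l).Perm (x :: l) := by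
  induction l with
  | nil => simp [pvIns]
  | cons a t ih =>
    simp only [pvIns]
    split_ifs with h
    · exact List.Perm.refl _
    · exact (ih.cons a).trans (List.Perm.swap x a t)

lemma pvIns_pairwise (x : Int) (l : List Int) (hl : l.Pairwise (· < ·)) (hx : x ∉ l) :
    (pvIns x l).Pairwise (· < ·) := by
  induction l with
  | nil => simp [pvIns]
  | cons a t ih =>
    simp only [pvIns]
    rcases List.pairwise_cons.mp hl with ⟨ha, ht⟩
    have hxa : x ≠ a := by intro h; exact hx (h ▸ List.mem_cons_self ..)
    have hxt : x ∉ t := fun h => hx (List.mem_cons_of_mem _ h)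
    split_ifs with h
    · exact List.pairwise_cons.mpr ⟨by
        intro y hy
        rcases List.mem_cons.mp hy with rfl | hy
        · exact lt_of_le_of_ne h hxa
        · exact lt_of_le_of_lt (le_of_lt (lt_of_le_of_ne h hxa)) (ha y hy), hl⟩
    · refine List.pairwise_cons.mpr ⟨?_, ih ht hxt⟩
      intro y hy
      have := (pvIns_perm x t).mem_iff.mp hy
      rcases List.mem_cons.mp this with rfl | hy'
      · omega
      · exact ha y hy'

-- A's loop step equals: top-3 of the list with x inserted in order
lemma pvStep_top3 (x : Int) (s : List Int) (hs : s.Pairwise (· < ·)) (hx : x ∉ s) :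
    pvStep (pvTop3 s) x = pvTop3 (pvIns x s) := by
  rcases s with _ | ⟨a, _ | ⟨b, _ | ⟨c, rest⟩⟩⟩ <;>
    simp only [List.mem_cons, not_or, List.not_mem_nil, List.pairwise_cons] at hs hx <;>
    simp only [pvTop3, pvStep, pvIns, pvLeInf] <;> split_ifs <;>
    first
      | rfl
      | simp_all

-- sorted (p ++ [x]) = ordered insertion of x into sorted p, for x ∉ p
lemma sorted_append_singleton (p : List Int) (x : Int) (hnp : p.Nodup) (hx : x ∉ p) :
    PySem.List.sorted (p ++ [x]) (fun y => y) false
      = pvIns x (PySem.List.sorted p (fun y => y) false) := by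
  set s := PySem.List.sorted p (fun y => y) false with hsdef
  have hperm : s.Perm p := PySem.List.sorted_perm ..
  have hpw : s.Pairwise (· ≤ ·) := by
    have := PySem.List.sorted_pairwise (xs := p) (key := fun y => y)
    simpa using this
  have hnd : s.Nodup := hperm.nodup_iff.mpr hnp
  have hxs : x ∉ s := fun h => hx (hperm.mem_iff.mp h)
  have hne : s.Pairwise (· ≠ ·) := hnd
  have hlt : s.Pairwise (· < ·) := (hpw.and hne).imp (fun h => lt_of_le_of_ne h.1 h.2)
  refine PySem.List.sorted_eq_of_perm_of_pairwise_lt (p ++ [x]) (pvIns x s) (fun y => y) ?_ ?_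
  · exact (pvIns_perm x s).trans ((hperm.cons x).trans (List.perm_append_singleton x p).symm)
  · simpa using pvIns_pairwise x s hlt hxs

-- A's fold over a duplicate-free list computes the first three elements of its sorted order
lemma fold_eq_top3 (u : List Int) (hu : u.Nodup) :
    u.foldl pvStep (none, none, none) = pvTop3 (PySem.List.sorted u (fun y => y) false) := by
  induction u using List.reverseRecOn with
  | nil => simp [pvTop3, PySem.List.sorted]
  | append_singleton p x ih =>
    obtain ⟨hnp, -, hdisj⟩ := List.nodup_append.mp hu
    have hx : x ∉ p := fun h => hdisj x h x (by simp) rfl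
    rw [List.foldl_append, List.foldl_cons, List.foldl_nil, ih hnp,
        sorted_append_singleton p x hnp hx]
    have hperm : (PySem.List.sorted p (fun y => y) false).Perm p := PySem.List.sorted_perm ..
    have hpw : (PySem.List.sorted p (fun y => y) false).Pairwise (· ≤ ·) := by
      have := PySem.List.sorted_pairwise (xs := p) (key := fun y => y); simpa using this
    have hnd : (PySem.List.sorted p (fun y => y) false).Nodup := hperm.nodup_iff.mpr hnp
    have hne : (PySem.List.sorted p (fun y => y) false).Pairwise (· ≠ ·) := hnd
    have hlt : (PySem.List.sorted p (fun y => y) false).Pairwise (· < ·) :=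
      (hpw.and hne).imp (fun h => lt_of_le_of_ne h.1 h.2)
    exact pvStep_top3 x _ hlt (fun h => hx (hperm.mem_iff.mp h))

-- ===== VERDICT (by name: the statement is the Claim_ definition above) =====
theorem findSecondThirdMin_spec : Claim_equal_findSecondThirdMin := by
  intro arr _
  unfold Spec_findSecondThirdMin findSecondThirdMin findSecondThirdMin_alt
  have hnd : (PySem.Set.ofList arr : List Int).Nodup := PySem.Set.nodup_ofList arr
  simp only [fold_eq_top3 _ hnd]
  generalize PySem.List.sorted (PySem.Set.ofList arr) (fun y => y) false = s
  rcases s with _ | ⟨a, _ | ⟨b, _ | ⟨c, r⟩⟩⟩ <;> simp [pvTop3]
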